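-- pv_equiv track=rewrite | github.com/Fsoudo/EDA2025-2026 | Algoritmos/Cenas/fibonacci_otimizado.py | _fast_doubling_helper
-- ===== SOURCE A (Python) =====
-- def _fast_doubling_helper(n):
--     """Retorna o par (F(n), F(n+1))."""
--     if n == 0:
--         return (0, 1)
--     fk, fk1 = _fast_doubling_helper(n >> 1)   # divide n a metade
--     f2k   = fk * (2 * fk1 - fk)               # F(2k)
--     f2k1  = fk * fk + fk1 * fk1               # F(2k+1)
--     if n & 1:                                  # se n e impar
--         return (f2k1, f2k + f2k1)
--     else:
--         return (f2k, f2k1)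
-- ===== SOURCE B (Python) =====
-- def _fast_doubling_helper(n):
--     """Retorna o par (F(n), F(n+1)) -- iterative fast doubling over the bits of n."""
--     a, b = 0, 1
--     for i in range(n.bit_length() - 1, -1, -1):
--         c = a * (2 * b - a)
--         d = a * a + b * b
--         if (n >> i) & 1:
--             a, b = d, c + d
--         else:
--             a, b = c, d
--     return (a, b)
-- ===== Notes on version B (the rewrite author's own statement) =====
-- stated objective: alternative
-- what changed: Replaces A's top-down recursion on n>>1 by an iterative fast-doubling loop that scans the bits of n from most significant to least significant with state (F(k),F(k+1)).
import Mathlib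
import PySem

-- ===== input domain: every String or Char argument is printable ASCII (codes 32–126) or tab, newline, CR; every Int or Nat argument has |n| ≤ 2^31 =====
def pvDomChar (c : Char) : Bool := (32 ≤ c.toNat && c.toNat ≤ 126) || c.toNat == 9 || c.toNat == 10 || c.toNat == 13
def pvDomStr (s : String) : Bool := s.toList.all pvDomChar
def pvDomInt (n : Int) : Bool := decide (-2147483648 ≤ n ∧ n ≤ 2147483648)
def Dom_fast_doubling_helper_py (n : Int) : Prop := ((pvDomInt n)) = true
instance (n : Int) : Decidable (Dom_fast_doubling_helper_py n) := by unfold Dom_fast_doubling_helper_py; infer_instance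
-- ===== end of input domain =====

-- B replaces A's top-down recursion by an iterative MSB→LSB fast-doubling bit scan (alternative decomposition, same cost).

-- ===== PORT A =====
-- Literal port of A's recursion. For n < 0 the Python recurses forever (RecursionError),
-- so that branch (excluded by Pre_) returns a dummy value to make the Lean function total.
def fast_doubling_helper_py (n : Int) : Int × Int :=
  if n = 0 then (0, 1)
  else if n < 0 then (0, 1)  -- Python: infinite recursion (RecursionError); outside Pre_
  else
    let p := fast_doubling_helper_py (PySem.Int.floordiv n 2)  -- n >> 1
    let fk := p.1
    let fk1 := p.2
    let f2k := fk * (2 * fk1 - fk)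
    let f2k1 := fk * fk + fk1 * fk1
    if PySem.Int.band n 1 = 1 then (f2k1, f2k + f2k1) else (f2k, f2k1)
termination_by n.toNat
decreasing_by
  have h2 : (0:Int) < 2 := by omega
  rw [PySem.Int.floordiv_eq_ediv_of_pos h2]
  omega

-- ===== PORT B =====
-- the for-loop of Source B: j counts the remaining iterations, current index i = j-1
def pvLoopB (n : Int) : Nat → Int × Int → Int × Int
  | 0, s => s
  | j + 1, (a, b) =>
      let c := a * (2 * b - a)
      let d := a * a + b * b
      pvLoopB n j (if PySem.Int.band (n >>> j) 1 = 1 then (d, c + d) else (c, d))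

def fast_doubling_helper_py_alt (n : Int) : Int × Int :=
  pvLoopB n (PySem.Int.bitLength n) (0, 1)

-- ===== PRECONDITION & SPEC =====
-- Pre_ excludes n < 0, where the Python A recurses on n >> 1 = n forever (RecursionError).
def Pre_fast_doubling_helper_py (n : Int) : Prop := 0 ≤ n
instance (n : Int) : Decidable (Pre_fast_doubling_helper_py n) := by unfold Pre_fast_doubling_helper_py; infer_instance
def pvWitness_fast_doubling_helper_py : Int := 10

def Spec_fast_doubling_helper_py (n : Int) (out : Int × Int) : Prop := out = fast_doubling_helper_py_alt n
instance (n : Int) (out : Int × Int) : Decidable (Spec_fast_doubling_helper_py n out) := by unfold Spec_fast_doubling_helper_py; infer_instance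

-- ===== CLAIM (what is proved, stated in full; the proofs are below) =====
def Claim_equal_fast_doubling_helper_py : Prop := ∀ (n : Int), Dom_fast_doubling_helper_py n → Pre_fast_doubling_helper_py n → Spec_fast_doubling_helper_py n (fast_doubling_helper_py n)

-- ===== LEMMAS AND PROOFS =====

-- the two fast-doubling identities, over Int
theorem pv_fib_two_mul (k : Nat) :
    ((Nat.fib (2 * k) : Int)) = (Nat.fib k : Int) * (2 * (Nat.fib (k + 1) : Int) - (Nat.fib k : Int)) := by
  have hle : Nat.fib k ≤ 2 * Nat.fib (k + 1) := by
    have := Nat.fib_le_fib_succ (n := k)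
    omega
  have h := Nat.fib_two_mul k
  have : ((Nat.fib (2 * k) : Int)) = ((Nat.fib k * (2 * Nat.fib (k + 1) - Nat.fib k) : Nat) : Int) := by
    exact_mod_cast congrArg (Nat.cast : Nat → Int) h
  rw [this]
  push_cast [Nat.cast_sub hle]
  ring

theorem pv_fib_two_mul_add_one (k : Nat) :
    ((Nat.fib (2 * k + 1) : Int)) = (Nat.fib k : Int) * (Nat.fib k : Int) + (Nat.fib (k + 1) : Int) * (Nat.fib (k + 1) : Int) := by
  have h := Nat.fib_two_mul_add_one k
  have : ((Nat.fib (2 * k + 1) : Int)) = ((Nat.fib (k + 1) ^ 2 + Nat.fib k ^ 2 : Nat) : Int) := by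
    exact_mod_cast congrArg (Nat.cast : Nat → Int) h
  rw [this]
  push_cast
  ring

-- A's port computes (F(m), F(m+1)) for natural inputs
theorem pv_A_fib (m : Nat) :
    fast_doubling_helper_py (m : Int) = ((Nat.fib m : Int), (Nat.fib (m + 1) : Int)) := by
  induction m using Nat.strong_induction_on with
  | _ m ih =>
    rcases Nat.eq_zero_or_pos m with hm | hm
    · subst hm; simp [fast_doubling_helper_py]
    · have hne : (m : Int) ≠ 0 := by exact_mod_cast Nat.pos_iff_ne_zero.mp hm
      have hnlt : ¬ (m : Int) < 0 := by omega
      rw [fast_doubling_helper_py]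
      have hdiv : PySem.Int.floordiv (m : Int) 2 = ((m / 2 : Nat) : Int) := by
        exact_mod_cast PySem.Int.floordiv_natCast m 2
      have hband : PySem.Int.band (m : Int) 1 = ((m &&& 1 : Nat) : Int) := by
        exact_mod_cast PySem.Int.band_natCast m 1
      have hrec := ih (m / 2) (Nat.div_lt_self hm (by omega))
      simp only [hne, hnlt, if_false, hdiv, hrec, hband]
      have hand : m &&& 1 = m % 2 := Nat.and_one_is_mod m
      set k := m / 2 with hk
      rcases Nat.even_or_odd m with he | ho
      · -- even: m = 2 * k
        have hmod : m % 2 = 0 := Nat.even_iff.mp he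
        have hm2 : m = 2 * k := by omega
        have hbit : ¬ (((m &&& 1 : Nat) : Int) = 1) := by rw [hand, hmod]; simp
        simp only [hbit, if_false]
        have e1 : (Nat.fib m : Int) = (Nat.fib k : Int) * (2 * (Nat.fib (k + 1) : Int) - (Nat.fib k : Int)) := by
          rw [hm2]; exact pv_fib_two_mul k
        have e2 : (Nat.fib (m + 1) : Int) = (Nat.fib k : Int) * (Nat.fib k : Int) + (Nat.fib (k + 1) : Int) * (Nat.fib (k + 1) : Int) := by
          rw [hm2]; exact pv_fib_two_mul_add_one k
        rw [e1, e2]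
      · -- odd: m = 2 * k + 1
        have hmod : m % 2 = 1 := Nat.odd_iff.mp ho
        have hm2 : m = 2 * k + 1 := by omega
        have hbit : (((m &&& 1 : Nat) : Int) = 1) := by rw [hand, hmod]; simp
        simp only [hbit, if_true]
        have e1 : (Nat.fib m : Int) = (Nat.fib k : Int) * (Nat.fib k : Int) + (Nat.fib (k + 1) : Int) * (Nat.fib (k + 1) : Int) := by
          rw [hm2]; exact pv_fib_two_mul_add_one k
        have e2 : (Nat.fib (m + 1) : Int) = (Nat.fib k : Int) * (2 * (Nat.fib (k + 1) : Int) - (Nat.fib k : Int)) + ((Nat.fib k : Int) * (Nat.fib k : Int) + (Nat.fib (k + 1) : Int) * (Nat.fib (k + 1) : Int)) := by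
          have h1 : m + 1 = 2 * k + 2 := by omega
          rw [h1, Nat.fib_add_two]
          push_cast
          rw [pv_fib_two_mul k, pv_fib_two_mul_add_one k]
        rw [e1, e2]

-- loop invariant for B: processing the low j bits from state (F(m >>> j), F(m >>> j + 1)) yields (F(m), F(m+1))
theorem pv_loopB_inv (m : Nat) (j : Nat) :
    pvLoopB (m : Int) j ((Nat.fib (m >>> j) : Int), (Nat.fib (m >>> j + 1) : Int))
      = ((Nat.fib m : Int), (Nat.fib (m + 1) : Int)) := by
  induction j with
  | zero => simp [pvLoopB]
  | succ j ihj =>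
    rw [pvLoopB]
    have hshift : ((m : Int) >>> j) = ((m >>> j : Nat) : Int) := by
      simp [Int.natCast_shiftRight]
    have hband : PySem.Int.band ((m >>> j : Nat) : Int) 1 = ((m >>> j &&& 1 : Nat) : Int) := by
      exact_mod_cast PySem.Int.band_natCast (m >>> j) 1
    have hand : m >>> j &&& 1 = (m >>> j) % 2 := Nat.and_one_is_mod _
    set k := m >>> (j + 1) with hk
    have hhalf : m >>> (j + 1) = (m >>> j) / 2 := by
      simp [Nat.shiftRight_succ]
    rcases Nat.even_or_odd (m >>> j) with he | ho
    · have hmod : (m >>> j) % 2 = 0 := Nat.even_iff.mp he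
      have hbit : ¬ (PySem.Int.band ((m : Int) >>> j) 1 = 1) := by
        rw [hshift, hband, hand, hmod]; simp
      simp only [hbit, if_false]
      have h0 : m >>> j = 2 * k := by omega
      have e1 : (Nat.fib (m >>> j) : Int) = (Nat.fib k : Int) * (2 * (Nat.fib (k + 1) : Int) - (Nat.fib k : Int)) := by
        rw [h0]; exact pv_fib_two_mul k
      have e2 : (Nat.fib (m >>> j + 1) : Int) = (Nat.fib k : Int) * (Nat.fib k : Int) + (Nat.fib (k + 1) : Int) * (Nat.fib (k + 1) : Int) := by
        rw [h0]; exact pv_fib_two_mul_add_one k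
      rw [← e1, ← e2]
      exact ihj
    · have hmod : (m >>> j) % 2 = 1 := Nat.odd_iff.mp ho
      have hbit : (PySem.Int.band ((m : Int) >>> j) 1 = 1) := by
        rw [hshift, hband, hand, hmod]; simp
      simp only [hbit, if_true]
      have h1 : m >>> j = 2 * k + 1 := by omega
      have hfib1 : (Nat.fib (m >>> j) : Int) = (Nat.fib k : Int) * (Nat.fib k : Int) + (Nat.fib (k + 1) : Int) * (Nat.fib (k + 1) : Int) := by
        rw [h1]; exact pv_fib_two_mul_add_one k
      have hfib2 : (Nat.fib (m >>> j + 1) : Int) =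
          (Nat.fib k : Int) * (2 * (Nat.fib (k + 1) : Int) - (Nat.fib k : Int)) +
            ((Nat.fib k : Int) * (Nat.fib k : Int) + (Nat.fib (k + 1) : Int) * (Nat.fib (k + 1) : Int)) := by
        have h2 : m >>> j + 1 = 2 * k + 2 := by omega
        rw [h2, Nat.fib_add_two]
        push_cast
        rw [pv_fib_two_mul k, pv_fib_two_mul_add_one k]
      rw [← hfib2, ← hfib1]
      exact ihj

-- B's port computes (F(m), F(m+1)) for natural inputs
theorem pv_B_fib (m : Nat) :
    fast_doubling_helper_py_alt (m : Int) = ((Nat.fib m : Int), (Nat.fib (m + 1) : Int)) := by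
  rw [fast_doubling_helper_py_alt]
  have htop : m >>> PySem.Int.bitLength (m : Int) = 0 := by
    have hlt : ((m : Int)).natAbs < 2 ^ PySem.Int.bitLength (m : Int) := PySem.Int.lt_two_pow_bitLength _
    simp only [Int.natAbs_natCast] at hlt
    simp [Nat.shiftRight_eq_div_pow, Nat.div_eq_of_lt hlt]
  have := pv_loopB_inv m (PySem.Int.bitLength (m : Int))
  rw [htop] at this
  simpa using this

-- ===== VERDICT (by name: the statement is the Claim_ definition above) =====
theorem fast_doubling_helper_py_spec : Claim_equal_fast_doubling_helper_py := by
  intro n _ hpre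
  have hn : n = ((n.toNat : Nat) : Int) := by
    exact (Int.toNat_of_nonneg hpre).symm
  unfold Spec_fast_doubling_helper_py
  rw [hn, pv_A_fib, pv_B_fib]
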